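-- pv_equiv track=rewrite | github.com/JNCJcoder/dio-projetos | dio-python-aceleração_internacional/desafios/Issuing Alerts.py | monitor_and_alert
-- ===== SOURCE A (Python) =====
-- def monitor_and_alert(metrics):
--     alerts = []
--
--     for metric in metrics:
--       if metric[0] == 'CPU':
--         if metric[1] >= 80:
--           alerts.append("Alert: High CPU usage detected ({}%)".format(metric[1]))
--           break
--
--       if metric[0] == 'RAM memory':
--         if metric[1] >= 70:
--           alerts.append("Alert: High RAM memory usage detected ({}%)".format(metric[1]))
--           break
--
--       if metric[0] == 'response time':
--         if metric[1] >= 250: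
--           alerts.append("Alert: Application response time above the limit ({}ms)".format(metric[1]))
--           break
--
--     if len(alerts) == 0:
--       alerts.append("No anomalies detected")
--
--     return '\n'.join(alerts)
-- ===== SOURCE B (Python) =====
-- _RULES = [
--     ('CPU', 80, 'Alert: High CPU usage detected ({}%)'),
--     ('RAM memory', 70, 'Alert: High RAM memory usage detected ({}%)'),
--     ('response time', 250, 'Alert: Application response time above the limit ({}ms)'),
-- ]
--
-- def monitor_and_alert(metrics):
--     # Stage 1: collect ALL breach messages (no early exit), driven by a rules table.
--     breaches = [tpl.format(value)
--                 for name, value in metrics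
--                 for rule_name, threshold, tpl in _RULES
--                 if name == rule_name and value >= threshold]
--     # Stage 2: the answer is the first breach, or the default.
--     return breaches[0] if breaches else 'No anomalies detected'
-- ===== Notes on version B (the rewrite author's own statement) =====
-- stated objective: alternative
-- what changed: B works in two staged passes: it first collects ALL breach messages over the whole list via a rules-table-driven comprehension (no break), then returns the first collected message or the default; A is a single early-breaking scan of three hard-coded if-blocks accumulating into a joined list.
import Mathlib
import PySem

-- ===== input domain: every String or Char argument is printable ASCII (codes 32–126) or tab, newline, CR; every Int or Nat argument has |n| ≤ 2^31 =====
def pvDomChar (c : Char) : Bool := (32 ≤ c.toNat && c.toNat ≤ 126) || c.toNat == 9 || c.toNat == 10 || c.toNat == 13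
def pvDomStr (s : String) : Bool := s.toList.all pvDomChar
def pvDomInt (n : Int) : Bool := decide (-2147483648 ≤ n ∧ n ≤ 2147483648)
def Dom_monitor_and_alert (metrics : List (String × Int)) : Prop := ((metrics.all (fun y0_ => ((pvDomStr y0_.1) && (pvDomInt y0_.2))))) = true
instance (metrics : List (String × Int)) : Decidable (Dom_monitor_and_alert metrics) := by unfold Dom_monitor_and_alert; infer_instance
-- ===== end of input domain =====

-- B trades A's early-breaking hard-coded scan for two staged passes over a rules table
-- (collect every breach message, then take the first or the default): alternative decomposition.


-- ===== PORT A =====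
-- the for-loop with break: returns the alerts list as accumulated when the loop ends or breaks
def pvLoopA : List (String × Int) → List String
  | [] => []
  | (n, v) :: rest =>
    if n = "CPU" then
      (if v ≥ 80 then ["Alert: High CPU usage detected (" ++ PySem.Int.toStr v ++ "%)"]
       else
        if n = "RAM memory" then
          (if v ≥ 70 then ["Alert: High RAM memory usage detected (" ++ PySem.Int.toStr v ++ "%)"]
           else
            if n = "response time" then
              (if v ≥ 250 then ["Alert: Application response time above the limit (" ++ PySem.Int.toStr v ++ "ms)"]
               else pvLoopA rest)
            else pvLoopA rest)
        else
          if n = "response time" then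
            (if v ≥ 250 then ["Alert: Application response time above the limit (" ++ PySem.Int.toStr v ++ "ms)"]
             else pvLoopA rest)
          else pvLoopA rest)
    else
      if n = "RAM memory" then
        (if v ≥ 70 then ["Alert: High RAM memory usage detected (" ++ PySem.Int.toStr v ++ "%)"]
         else
          if n = "response time" then
            (if v ≥ 250 then ["Alert: Application response time above the limit (" ++ PySem.Int.toStr v ++ "ms)"]
             else pvLoopA rest)
          else pvLoopA rest)
      else
        if n = "response time" then
          (if v ≥ 250 then ["Alert: Application response time above the limit (" ++ PySem.Int.toStr v ++ "ms)"]
           else pvLoopA rest)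
        else pvLoopA rest

def monitor_and_alert (metrics : List (String × Int)) : String :=
  let alerts := pvLoopA metrics
  let alerts := if alerts.length = 0 then ["No anomalies detected"] else alerts
  PySem.Str.join "\n" alerts

-- ===== PORT B =====
-- Source B's _RULES table: name, threshold, message template split at the '{}' hole
def pvRules : List (String × Int × String × String) :=
  [("CPU", 80, "Alert: High CPU usage detected (", "%)"),
   ("RAM memory", 70, "Alert: High RAM memory usage detected (", "%)"),
   ("response time", 250, "Alert: Application response time above the limit (", "ms)")]

-- the nested comprehension: for each metric, all rule messages it breaches
def pvBreaches (metrics : List (String × Int)) : List String :=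
  metrics.flatMap (fun m =>
    (pvRules.filter (fun r => m.1 = r.1 ∧ m.2 ≥ r.2.1)).map
      (fun r => r.2.2.1 ++ PySem.Int.toStr m.2 ++ r.2.2.2))

def monitor_and_alert_alt (metrics : List (String × Int)) : String :=
  match pvBreaches metrics with
  | [] => "No anomalies detected"
  | b :: _ => b

-- ===== PRECONDITION & SPEC =====
def Spec_monitor_and_alert (metrics : List (String × Int)) (out : String) : Prop := out = monitor_and_alert_alt metrics
instance (metrics : List (String × Int)) (out : String) : Decidable (Spec_monitor_and_alert metrics out) := by unfold Spec_monitor_and_alert; infer_instance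

-- ===== CLAIM (what is proved, stated in full; the proofs are below) =====
def Claim_equal_monitor_and_alert : Prop := ∀ (metrics : List (String × Int)), Dom_monitor_and_alert metrics → Spec_monitor_and_alert metrics (monitor_and_alert metrics)

-- ===== LEMMAS AND PROOFS =====

-- joining a one-element list is that element
theorem pv_join1 (s : String) : PySem.Str.join "\n" [s] = s := by simp [PySem.Str.join]

-- one metric's contribution to the breach list, case-split on the metric name
def pvIfChain (n : String) (v : Int) : List String :=
  if n = "CPU" then (if v ≥ 80 then ["Alert: High CPU usage detected (" ++ PySem.Int.toStr v ++ "%)"] else [])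
  else if n = "RAM memory" then (if v ≥ 70 then ["Alert: High RAM memory usage detected (" ++ PySem.Int.toStr v ++ "%)"] else [])
  else if n = "response time" then (if v ≥ 250 then ["Alert: Application response time above the limit (" ++ PySem.Int.toStr v ++ "ms)"] else [])
  else []

theorem pv_inner_eq (n : String) (v : Int) :
    (pvRules.filter (fun r => n = r.1 ∧ v ≥ r.2.1)).map
      (fun r => r.2.2.1 ++ PySem.Int.toStr v ++ r.2.2.2) = pvIfChain n v := by
  by_cases h1 : n = "CPU" <;> by_cases h2 : n = "RAM memory" <;> by_cases h3 : n = "response time" <;>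
    simp_all [pvRules, pvIfChain, List.filter] <;> split_ifs with hv <;>
    simp_all <;> rw [decide_eq_false (by omega)]

theorem pvBreaches_cons (n : String) (v : Int) (rest : List (String × Int)) :
    pvBreaches ((n, v) :: rest) = pvIfChain n v ++ pvBreaches rest := by
  unfold pvBreaches
  rw [List.flatMap_cons, pv_inner_eq]

-- the two programs' results coincide, by induction on the metric list
theorem pv_main (metrics : List (String × Int)) :
    monitor_and_alert metrics = monitor_and_alert_alt metrics := by
  induction metrics with
  | nil => simp [monitor_and_alert, monitor_and_alert_alt, pvBreaches, pvLoopA, pv_join1]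
  | cons m rest ih =>
    obtain ⟨n, v⟩ := m
    unfold monitor_and_alert monitor_and_alert_alt at *
    simp only [List.length_eq_zero_iff] at ih ⊢
    rw [pvBreaches_cons]
    by_cases h1 : n = "CPU"
    · subst h1
      by_cases hv : v ≥ 80 <;> simp [pvLoopA, pvIfChain, hv, pv_join1] <;> exact ih
    · by_cases h2 : n = "RAM memory"
      · subst h2
        by_cases hv : v ≥ 70 <;> simp [pvLoopA, pvIfChain, h1, hv, pv_join1] <;> exact ih
      · by_cases h3 : n = "response time"
        · subst h3
          by_cases hv : v ≥ 250 <;> simp [pvLoopA, pvIfChain, h1, h2, hv, pv_join1] <;> exact ih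
        · simp only [pvLoopA, pvIfChain, h1, h2, h3, if_false, List.nil_append]
          exact ih

-- ===== VERDICT (by name: the statement is the Claim_ definition above) =====
theorem monitor_and_alert_spec : Claim_equal_monitor_and_alert := by
  intro metrics _
  exact pv_main metrics
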